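-- pv_equiv track=rewrite | github.com/mindspore-ai/mindscience | MindSPONGE/mindsponge/toolkits/forcefield/base/lj_base.py | _get_real_lj
-- ===== SOURCE A (Python) =====
-- def _get_real_lj(ljtypes, same_type):
--     """
--
--     :param ljtypes:
--     :param same_type:
--     :return:
--     """
--     real_ljtypes = []
--     tosub = 0
--     for i, lj_single_i in enumerate(ljtypes):
--         if same_type[i] == i:
--             real_ljtypes.append(lj_single_i)
--             same_type[i] -= tosub
--         else:
--             same_type[i] = same_type[same_type[i]]
--             tosub += 1
--     return real_ljtypes
-- ===== SOURCE B (Python) =====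
-- def _get_real_lj(ljtypes, same_type):
--     # Return-value equivalence with A; same_type is rewritten in place here too
--     # (identical writes whenever non-canonical entries point to canonical roots,
--     # the union-find invariant of the caller).
--     canon = [i for i in range(len(ljtypes)) if same_type[i] == i]
--     real_ljtypes = [ljtypes[c] for c in canon]
--     newidx = {c: k for k, c in enumerate(canon)}
--     for i in range(len(ljtypes)):
--         same_type[i] = newidx.get(same_type[i], same_type[i])
--     return real_ljtypes
-- ===== Notes on version B (the rewrite author's own statement) =====
-- stated objective: alternative
-- what changed: Replaces A's single threaded pass (tosub accumulator, chained same_type[same_type[i]] rewrites interleaved with collection) by a staged filter/map structure: one comprehension selects the canonical indices, a map extracts the real types, a dict built from the canonical list drives a separate remapping pass; return value proved equal (side-effect writes coincide under the caller's union-find invariant).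
import Mathlib
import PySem

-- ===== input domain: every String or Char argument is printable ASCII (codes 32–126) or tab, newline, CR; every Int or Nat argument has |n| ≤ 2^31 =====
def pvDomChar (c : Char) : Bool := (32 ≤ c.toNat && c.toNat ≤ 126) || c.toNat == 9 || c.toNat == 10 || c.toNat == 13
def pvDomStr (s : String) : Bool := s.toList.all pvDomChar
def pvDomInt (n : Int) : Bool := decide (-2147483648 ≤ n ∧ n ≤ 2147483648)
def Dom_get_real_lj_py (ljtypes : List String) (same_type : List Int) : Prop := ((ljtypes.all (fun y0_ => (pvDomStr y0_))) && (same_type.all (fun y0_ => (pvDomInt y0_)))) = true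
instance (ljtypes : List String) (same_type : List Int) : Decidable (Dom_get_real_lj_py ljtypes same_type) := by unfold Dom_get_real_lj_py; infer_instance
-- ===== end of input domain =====

-- B replaces A's single threaded pass by a staged filter/map structure; equivalence is about the
-- RETURN value only — both Pythons also mutate same_type in place (identically under the caller's
-- union-find invariant; B's writes are stated in Source B).

-- ===== PORT A =====
-- transliteration of A's single loop: state = (same_type list, accumulator real, tosub);
-- pyGet?/pySetD are exact for Python indexing (negative wrap, none = IndexError)
def goA_get_real_lj (ljs : List String) (st : List Int) (i : Nat) (real : List String) (tosub : Int) :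
    Option (List String) :=
  match ljs with
  | [] => some real
  | lj :: rest =>
    match PySem.List.pyGet? st (i : Int) with
    | none => none
    | some v =>
      if v = (i : Int) then
        goA_get_real_lj rest (PySem.List.pySetD st (i : Int) (v - tosub)) (i + 1) (real ++ [lj]) tosub
      else
        match PySem.List.pyGet? st v with
        | none => none
        | some w => goA_get_real_lj rest (PySem.List.pySetD st (i : Int) w) (i + 1) real (tosub + 1)

def get_real_lj_py (ljtypes : List String) (same_type : List Int) : List String :=
  (goA_get_real_lj ljtypes same_type 0 [] 0).getD []

-- ===== PORT B =====
-- transliteration of Source B's two comprehensions: 'canon' selects the canonical indices, then a map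
-- extracts the corresponding types. Indices in canon are always in range, so the getD "" default of
-- the exact pyGet? primitive is never taken. Source B's newidx dict and its remapping pass only rewrite
-- same_type in place and do not affect the return value, so they have no Lean counterpart.
def get_real_lj_py_alt (ljtypes : List String) (same_type : List Int) : List String :=
  let canon := (List.range ljtypes.length).filter
    (fun (j : Nat) => PySem.List.pyGet? same_type (j : Int) == some (j : Int))
  canon.map (fun (c : Nat) => (PySem.List.pyGet? ljtypes (c : Int)).getD "")

-- ===== PRECONDITION & SPEC =====
-- Pre_ excludes exactly the inputs where A raises IndexError: same_type shorter than ljtypes, or a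
-- non-canonical entry st[i] ≠ i outside [-len(st), len(st)) (the chained lookup same_type[same_type[i]]).
def Pre_get_real_lj_py (ljtypes : List String) (same_type : List Int) : Prop :=
  ljtypes.length ≤ same_type.length ∧
  ∀ i ∈ List.range ljtypes.length,
    same_type.getD i 0 = (i : Int) ∨
      (-(same_type.length : Int) ≤ same_type.getD i 0 ∧ same_type.getD i 0 < (same_type.length : Int))
instance (ljtypes : List String) (same_type : List Int) : Decidable (Pre_get_real_lj_py ljtypes same_type) := by
  unfold Pre_get_real_lj_py; infer_instance

def pvWitness_get_real_lj_py : List String × List Int := (["a", "b", "c"], [0, 0, 2])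

def Spec_get_real_lj_py (ljtypes : List String) (same_type : List Int) (out : List String) : Prop :=
  out = get_real_lj_py_alt ljtypes same_type
instance (ljtypes : List String) (same_type : List Int) (out : List String) : Decidable (Spec_get_real_lj_py ljtypes same_type out) := by unfold Spec_get_real_lj_py; infer_instance

-- ===== CLAIM (what is proved, stated in full; the proofs are below) =====
def Claim_equal_get_real_lj_py : Prop := ∀ (ljtypes : List String) (same_type : List Int), Dom_get_real_lj_py ljtypes same_type → Pre_get_real_lj_py ljtypes same_type → Spec_get_real_lj_py ljtypes same_type (get_real_lj_py ljtypes same_type)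

-- ===== LEMMAS AND PROOFS =====

-- the selection both programs compute: keep lj at position j iff st[j] == j (A never writes st at a
-- position ≥ its cursor before reading it, so reading the evolving st there equals the original)
def selLj (st : List Int) (i : Nat) (ljs : List String) : List String :=
  match ljs with
  | [] => []
  | lj :: rest => (if st.getD i 0 = (i : Int) then [lj] else []) ++ selLj st (i + 1) rest

theorem selLj_congr (ljs : List String) (st₁ st₂ : List Int) (i : Nat)
    (h : ∀ j, i ≤ j → j < i + ljs.length → st₁.getD j 0 = st₂.getD j 0) :
    selLj st₁ i ljs = selLj st₂ i ljs := by
  induction ljs generalizing i with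
  | nil => rfl
  | cons lj rest ih =>
    simp only [selLj]
    rw [h i le_rfl (by simp), ih (i + 1) (fun j hj hj' => h j (by omega) (by simp at hj' ⊢; omega))]

-- B's filter/map over an index range equals the selection, for any window of the full list
theorem altGo_eq (LJ : List String) (st : List Int) (ljs : List String) (i : Nat)
    (hdrop : LJ.drop i = ljs) (hlen : i + ljs.length ≤ st.length) :
    (((List.range' i ljs.length).filter
        (fun (j : Nat) => PySem.List.pyGet? st (j : Int) == some (j : Int))).map
      (fun (c : Nat) => (PySem.List.pyGet? LJ (c : Int)).getD "")) = selLj st i ljs := by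
  induction ljs generalizing i with
  | nil => rfl
  | cons lj rest ih =>
    have hi : i < st.length := by simp at hlen; omega
    have hget : PySem.List.pyGet? st (i : Int) = some st[i] := by
      simp [PySem.List.pyGet?_natCast, List.getElem?_eq_getElem hi]
    have hgetD : st.getD i 0 = st[i] := List.getD_eq_getElem st 0 hi
    have hLJi : LJ[i]? = some lj := by
      have : (LJ.drop i)[0]? = LJ[i + 0]? := List.getElem?_drop
      rw [hdrop] at this; simpa using this.symm
    have hLJget : PySem.List.pyGet? LJ (i : Int) = some lj := by
      simp [PySem.List.pyGet?_natCast, hLJi]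
    have hdrop' : LJ.drop (i + 1) = rest := by
      have : List.drop 1 (List.drop i LJ) = List.drop (i + 1) LJ := List.drop_drop ..
      rw [hdrop] at this; simpa using this.symm
    have hrest := ih (i + 1) hdrop' (by simp at hlen ⊢; omega)
    simp only [List.length_cons]
    rw [List.range'_succ]
    by_cases hv : st[i] = (i : Int)
    · rw [List.filter_cons_of_pos (by simp [hget, hv]), List.map_cons, hrest]
      simp [selLj, List.getElem?_eq_getElem hi, hv, hLJget]
    · rw [List.filter_cons_of_neg (by simp [hget, hv]), hrest]
      simp [selLj, List.getElem?_eq_getElem hi, hv]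

theorem goA_eq (ljs : List String) (st : List Int) (i : Nat) (real : List String) (tosub : Int)
    (hlen : i + ljs.length ≤ st.length)
    (hrng : ∀ j, i ≤ j → j < i + ljs.length →
      st.getD j 0 = (j : Int) ∨ (-(st.length : Int) ≤ st.getD j 0 ∧ st.getD j 0 < (st.length : Int))) :
    goA_get_real_lj ljs st i real tosub = some (real ++ selLj st i ljs) := by
  induction ljs generalizing st i real tosub with
  | nil => simp [goA_get_real_lj, selLj]
  | cons lj rest ih =>
    have hi : i < st.length := by simp at hlen; omega
    have hget : PySem.List.pyGet? st (i : Int) = some st[i] := by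
      simp [PySem.List.pyGet?_natCast, List.getElem?_eq_getElem hi]
    have hgetD : st.getD i 0 = st[i] := List.getD_eq_getElem st 0 hi
    simp only [goA_get_real_lj, hget, selLj, hgetD]
    by_cases hv : st[i] = (i : Int)
    · simp only [hv]
      have hset : PySem.List.pySetD st (i : Int) ((i : Int) - tosub) = st.set i ((i : Int) - tosub) :=
        PySem.List.pySetD_natCast ..
      have hagree : ∀ j, i + 1 ≤ j → j < (i + 1) + rest.length →
          (st.set i ((i : Int) - tosub)).getD j 0 = st.getD j 0 := by
        intro j hj _; simp [List.getD, List.getElem?_set_ne (by omega : i ≠ j)]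
      rw [hset, ih (st.set i ((i : Int) - tosub)) (i + 1) (real ++ [lj]) tosub
            (by simp at hlen ⊢; omega)
            (fun j hj hj' => by
              rw [hagree j hj (by simpa using hj'), List.length_set]
              exact hrng j (by omega) (by simp at hj' ⊢; omega)),
          selLj_congr rest _ st (i + 1) hagree]
      simp
    · simp only [if_neg hv]
      have hb : -(st.length : Int) ≤ st[i] ∧ st[i] < (st.length : Int) := by
        rcases hrng i le_rfl (by simp) with h | h
        · exact absurd (hgetD ▸ h) hv
        · exact ⟨hgetD ▸ h.1, hgetD ▸ h.2⟩
      obtain ⟨w, hw⟩ : ∃ w, PySem.List.pyGet? st st[i] = some w := by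
        cases hgw : PySem.List.pyGet? st st[i] with
        | none =>
          rw [PySem.List.pyGet?_eq_none_iff] at hgw
          exact absurd (by constructor <;> omega) hgw
        | some w => exact ⟨w, rfl⟩
      have hset : PySem.List.pySetD st (i : Int) w = st.set i w := PySem.List.pySetD_natCast ..
      have hagree : ∀ j, i + 1 ≤ j → j < (i + 1) + rest.length →
          (st.set i w).getD j 0 = st.getD j 0 := by
        intro j hj _; simp [List.getD, List.getElem?_set_ne (by omega : i ≠ j)]
      rw [hw]
      dsimp only
      rw [hset, ih (st.set i w) (i + 1) real (tosub + 1)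
            (by simp at hlen ⊢; omega)
            (fun j hj hj' => by
              rw [hagree j hj (by simpa using hj'), List.length_set]
              exact hrng j (by omega) (by simp at hj' ⊢; omega)),
          selLj_congr rest _ st (i + 1) hagree]
      simp

-- ===== VERDICT (by name: the statement is the Claim_ definition above) =====
theorem get_real_lj_py_spec : Claim_equal_get_real_lj_py := by
  intro ljtypes same_type _ hpre
  obtain ⟨hlen, hrng⟩ := hpre
  unfold Spec_get_real_lj_py get_real_lj_py get_real_lj_py_alt
  have hA := goA_eq ljtypes same_type 0 [] 0 (by omega)
    (fun j _ hj' => hrng j (by simpa using hj'))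
  have hB := altGo_eq ljtypes same_type ljtypes 0 (by simp) (by omega)
  rw [hA]
  simpa [List.range_eq_range'] using hB.symm
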